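-- pv_equiv track=rewrite | github.com/eronekogin/leetcode | 2025/number_of_even_and_odd_bits.py | even_odd_bit
-- ===== SOURCE A (Python) =====
-- def even_odd_bit(n: int) -> list[int]:
--     """
--     even odd bit
--     """
--     digits: list[int] = []
--     while n:
--         n, r = divmod(n, 2)
--         digits.append(r)
--
--     rslt = [0, 0]
--     for i, d in enumerate(digits):
--         if d == 0:
--             continue
--
--         rslt[i & 1] += 1
--
--     return rslt
-- ===== SOURCE B (Python) =====
-- def even_odd_bit(n: int) -> list[int]:
--     """
--     even odd bit
--     """
--     even = odd = 0
--     while n: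
--         even += n & 1
--         odd += (n >> 1) & 1
--         n >>= 2
--     return [even, odd]
-- ===== Notes on version B (the rewrite author's own statement) =====
-- stated objective: simpler
-- what changed: Replaces the two-pass version (build a digit list with divmod, then a second enumerate pass bumping rslt[i & 1]) with a single bit-twiddling loop that consumes two bits per iteration and keeps the two counters directly, with no intermediate list.
import Mathlib
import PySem

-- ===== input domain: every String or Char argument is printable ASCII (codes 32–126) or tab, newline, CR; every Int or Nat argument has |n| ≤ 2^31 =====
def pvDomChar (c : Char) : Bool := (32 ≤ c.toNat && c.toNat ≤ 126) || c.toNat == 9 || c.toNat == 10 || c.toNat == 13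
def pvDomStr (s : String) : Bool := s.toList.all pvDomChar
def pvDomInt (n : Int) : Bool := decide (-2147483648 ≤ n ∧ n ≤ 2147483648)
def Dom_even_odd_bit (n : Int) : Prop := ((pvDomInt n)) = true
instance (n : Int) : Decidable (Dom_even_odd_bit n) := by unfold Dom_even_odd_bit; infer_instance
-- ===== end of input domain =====

-- B replaces A's two passes (digit list via divmod, then an enumerate pass bumping rslt[i & 1])
-- with one bit-twiddling loop keeping the two counters directly: a simpler, list-free decomposition.


-- ===== PORT A =====
-- 'while n:' of A: for n < 0 Python loops forever, so the guard is written '0 < n'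
-- (a totality guard; those inputs are outside Pre_even_odd_bit).
def pvDigitsA (n : Int) : List Int :=
  if _h : 0 < n then
    PySem.Int.mod n 2 :: pvDigitsA (PySem.Int.floordiv n 2)
  else []
termination_by n.toNat
decreasing_by
  rw [PySem.Int.floordiv_eq_ediv_of_pos (by omega : (0:Int) < 2)]
  omega

def even_odd_bit (n : Int) : List Int :=
  (PySem.List.enumerate (pvDigitsA n) 0).foldl
    (fun rslt p =>
      if p.2 == 0 then rslt
      else
        PySem.List.pySetD rslt (PySem.Int.band p.1 1)
          (PySem.List.pyGetD rslt (PySem.Int.band p.1 1) 0 + 1))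
    [0, 0]

-- ===== PORT B =====
-- 'while n:' of B: same totality guard '0 < n' (B's loop also diverges for n < 0 in Python).
def pvLoopB (n even odd : Int) : Int × Int :=
  if _h : 0 < n then
    pvLoopB (n >>> (2 : Nat)) (even + PySem.Int.band n 1) (odd + PySem.Int.band (n >>> (1 : Nat)) 1)
  else (even, odd)
termination_by n.toNat
decreasing_by
  rw [Int.shiftRight_eq_div_pow]
  omega

def even_odd_bit_alt (n : Int) : List Int :=
  let r := pvLoopB n 0 0
  [r.1, r.2]

-- ===== PRECONDITION & SPEC =====
-- A's while loop never terminates for n < 0 (divmod(n, 2) keeps n at -1), so A returns exactly on 0 ≤ n.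
def Pre_even_odd_bit (n : Int) : Prop := 0 ≤ n
instance (n : Int) : Decidable (Pre_even_odd_bit n) := by unfold Pre_even_odd_bit; infer_instance
def pvWitness_even_odd_bit : Int := (10)

def Spec_even_odd_bit (n : Int) (out : List Int) : Prop := out = even_odd_bit_alt n
instance (n : Int) (out : List Int) : Decidable (Spec_even_odd_bit n out) := by unfold Spec_even_odd_bit; infer_instance

-- ===== CLAIM (what is proved, stated in full; the proofs are below) =====
def Claim_equal_even_odd_bit : Prop := ∀ (n : Int), Dom_even_odd_bit n → Pre_even_odd_bit n → Spec_even_odd_bit n (even_odd_bit n)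

-- ===== LEMMAS AND PROOFS =====

-- the common specification: (set bits at even indices, set bits at odd indices) of the LSB-first digits of m
def pvS (m : Nat) : Int × Int :=
  if h : m = 0 then (0, 0)
  else (((m % 2 : Nat) : Int) + (pvS (m / 2)).2, (pvS (m / 2)).1)
termination_by m
decreasing_by exact Nat.div_lt_self (by omega) (by omega)

-- the same pair computed from a digit list
def pvEvod : List Int → Int × Int
  | [] => (0, 0)
  | d :: ds => ((if d = 0 then 0 else 1) + (pvEvod ds).2, (pvEvod ds).1)

lemma pvDigitsA_natCast (m : Nat) (h : 0 < m) :
    pvDigitsA (m : Int) = ((m % 2 : Nat) : Int) :: pvDigitsA ((m / 2 : Nat) : Int) := by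
  rw [pvDigitsA]
  simp [h]

lemma pvEvod_digits (m : Nat) : pvEvod (pvDigitsA (m : Int)) = pvS m := by
  induction m using Nat.strong_induction_on with
  | _ m ih =>
    by_cases h : m = 0
    · subst h
      rw [pvDigitsA, pvS]
      simp [pvEvod]
    · rw [pvDigitsA_natCast m (by omega), pvS]
      simp only [pvEvod, h, dite_false]
      rw [ih (m / 2) (Nat.div_lt_self (by omega) (by omega))]
      have h2 : m % 2 = 0 ∨ m % 2 = 1 := by omega
      rcases h2 with h2 | h2 <;> simp [h2]

-- A's fold over the enumerated digits, with generalized start index and accumulator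
lemma pvFoldA (ds : List Int) (k : Nat) (a b : Int) :
    (PySem.List.enumerate ds (k : Int)).foldl
      (fun rslt p =>
        if p.2 == 0 then rslt
        else
          PySem.List.pySetD rslt (PySem.Int.band p.1 1)
            (PySem.List.pyGetD rslt (PySem.Int.band p.1 1) 0 + 1))
      [a, b]
    = if k % 2 = 0 then [a + (pvEvod ds).1, b + (pvEvod ds).2]
      else [a + (pvEvod ds).2, b + (pvEvod ds).1] := by
  induction ds generalizing k a b with
  | nil =>
    simp [PySem.List.enumerate_nil, pvEvod]
  | cons d ds ih =>
    rw [PySem.List.enumerate_cons]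
    have hk1 : ((k : Int) + 1) = ((k + 1 : Nat) : Int) := by push_cast; ring
    have hband : PySem.Int.band (k : Int) 1 = ((k % 2 : Nat) : Int) := by
      rw [show ((1 : Int)) = ((1 : Nat) : Int) from rfl, PySem.Int.band_natCast]
      congr 1
      exact Nat.and_one_is_mod k
    have h2 : k % 2 = 0 ∨ k % 2 = 1 := by omega
    by_cases hd : d = 0
    · -- skipped digit
      simp only [List.foldl_cons, hd, beq_self_eq_true, if_true, hk1, ih]
      have : (k + 1) % 2 = 1 - k % 2 := by omega
      rcases h2 with h2 | h2 <;> simp [pvEvod, h2, this]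
    · -- counted digit
      have hd' : (d == 0) = false := by simp [hd]
      simp only [List.foldl_cons, hd', Bool.false_eq_true, if_false, hband]
      rcases h2 with h2 | h2
      · have hset : PySem.List.pySetD [a, b] ((k % 2 : Nat) : Int)
              (PySem.List.pyGetD [a, b] ((k % 2 : Nat) : Int) 0 + 1) = [a + 1, b] := by
          rw [PySem.List.pySetD_natCast, PySem.List.pyGetD_natCast, h2]
          simp
        rw [hset, hk1, ih]
        have : (k + 1) % 2 = 1 := by omega
        simp [pvEvod, hd, h2, this]
        ring
      · have hset : PySem.List.pySetD [a, b] ((k % 2 : Nat) : Int)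
              (PySem.List.pyGetD [a, b] ((k % 2 : Nat) : Int) 0 + 1) = [a, b + 1] := by
          rw [PySem.List.pySetD_natCast, PySem.List.pyGetD_natCast, h2]
          simp
        rw [hset, hk1, ih]
        have : (k + 1) % 2 = 0 := by omega
        simp [pvEvod, hd, h2, this]
        ring

-- pvS unfolded two binary digits at a time (the step B's loop takes)
lemma pvS_two_step (m : Nat) (h : m ≠ 0) :
    pvS m = (((m % 2 : Nat) : Int) + (pvS (m / 4)).1, ((m / 2 % 2 : Nat) : Int) + (pvS (m / 4)).2) := by
  rw [pvS]
  simp only [h, dite_false]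
  by_cases h2 : m / 2 = 0
  · have hm : m = 1 := by omega
    subst hm
    rw [pvS, pvS]
    norm_num
  · rw [pvS]
    simp only [h2, dite_false]
    have : m / 2 / 2 = m / 4 := by omega
    rw [this]

lemma pvLoopB_natCast (m : Nat) (e o : Int) :
    pvLoopB (m : Int) e o = (e + (pvS m).1, o + (pvS m).2) := by
  induction m using Nat.strong_induction_on generalizing e o with
  | _ m ih =>
    by_cases h : m = 0
    · subst h
      rw [pvLoopB, pvS]
      simp
    · rw [pvLoopB]
      have hpos : (0 : Int) < (m : Int) := by exact_mod_cast Nat.pos_of_ne_zero h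
      simp only [hpos, dite_true]
      have hs2 : ((m : Int) >>> (2 : Nat)) = ((m / 4 : Nat) : Int) := by
        rw [Int.shiftRight_eq_div_pow]
        omega
      have hs1 : ((m : Int) >>> (1 : Nat)) = ((m / 2 : Nat) : Int) := by
        rw [Int.shiftRight_eq_div_pow]
        omega
      have hb0 : PySem.Int.band (m : Int) 1 = ((m % 2 : Nat) : Int) := by
        rw [show ((1 : Int)) = ((1 : Nat) : Int) from rfl, PySem.Int.band_natCast]
        congr 1
        exact Nat.and_one_is_mod m
      have hb1 : PySem.Int.band ((m / 2 : Nat) : Int) 1 = ((m / 2 % 2 : Nat) : Int) := by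
        rw [show ((1 : Int)) = ((1 : Nat) : Int) from rfl, PySem.Int.band_natCast]
        congr 1
        exact Nat.and_one_is_mod (m / 2)
      rw [hs2, hs1, hb0, hb1, ih (m / 4) (by omega)]
      rw [pvS_two_step m h]
      simp only [Prod.mk.injEq]
      constructor <;> ring

-- ===== VERDICT (by name: the statement is the Claim_ definition above) =====
theorem even_odd_bit_spec : Claim_equal_even_odd_bit := by
  intro n _ hpre
  obtain ⟨m, rfl⟩ : ∃ m : Nat, n = (m : Int) := ⟨n.toNat, (Int.toNat_of_nonneg hpre).symm⟩
  unfold Spec_even_odd_bit even_odd_bit even_odd_bit_alt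
  have hB := pvLoopB_natCast m 0 0
  have hA := pvFoldA (pvDigitsA (m : Int)) 0 0 0
  simp only [Nat.cast_zero] at hA
  rw [pvEvod_digits] at hA
  simp at hA
  simp [hA, hB]
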